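-- pv_equiv track=rewrite | github.com/fengyh3/TSMSA | bert_model/evaluate_pair.py | find_opinion
-- ===== SOURCE A (Python) =====
-- def find_opinion(pred, text):
--     opinion_start = []
--     opinion_end = []
--     flag = False
--     for idx in range(len(text)):
--         if pred[idx] == 4:
--             continue
--         if pred[idx] == 1:
--             if flag:
--                 opinion_end.append(idx)
--             opinion_start.append(idx)
--             flag = True
--         elif flag and pred[idx] != 2:
--             opinion_end.append(idx)
--             flag = False
--     if flag:
--         opinion_end.append(len(text))
--
--     return opinion_start, opinion_end
-- ===== SOURCE B (Python) =====
-- def find_opinion(pred, text):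
--     n = len(text)
--     opinion_start = [i for i in range(n) if pred[i] == 1]
--     opinion_end = []
--     for s in opinion_start:
--         e = n
--         for j in range(s + 1, n):
--             if pred[j] not in (2, 4):
--                 e = j
--                 break
--         opinion_end.append(e)
--     return opinion_start, opinion_end
-- ===== Notes on version B (the rewrite author's own statement) =====
-- stated objective: simpler
-- what changed: Replaces A's single-pass flag state machine with a stateless two-step decomposition: collect all start indices (pred[i]==1) by a comprehension, then for each start scan forward for the first index not in {2,4} (or len(text)) as its end.
import Mathlib
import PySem

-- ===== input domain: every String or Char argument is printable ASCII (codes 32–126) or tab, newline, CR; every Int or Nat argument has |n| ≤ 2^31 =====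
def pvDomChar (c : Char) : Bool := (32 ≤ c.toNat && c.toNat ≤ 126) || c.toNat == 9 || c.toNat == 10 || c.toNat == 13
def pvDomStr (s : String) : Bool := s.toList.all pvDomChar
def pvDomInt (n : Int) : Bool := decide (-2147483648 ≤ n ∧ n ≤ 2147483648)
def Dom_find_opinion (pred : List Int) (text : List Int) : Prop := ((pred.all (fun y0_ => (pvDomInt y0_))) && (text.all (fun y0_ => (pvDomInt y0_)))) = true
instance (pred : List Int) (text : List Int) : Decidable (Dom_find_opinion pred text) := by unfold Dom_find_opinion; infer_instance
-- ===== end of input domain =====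

-- B replaces A's flag state machine by a stateless decomposition (collect starts, then find each end); objective: simpler.

-- ===== PORT A =====
-- A's loop body as a helper: the three branches in A's order (4 / 1 / flag-and-not-2).
def fpStepA (pred : List Int) (st : List Int × List Int × Bool) (idx : Int) :
    List Int × List Int × Bool :=
  if PySem.List.pyGetD pred idx 0 == 4 then st
  else if PySem.List.pyGetD pred idx 0 == 1 then
    (st.1 ++ [idx], (if st.2.2 then st.2.1 ++ [idx] else st.2.1), true)
  else if st.2.2 && !(PySem.List.pyGetD pred idx 0 == 2) then
    (st.1, st.2.1 ++ [idx], false)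
  else st

def find_opinion (pred : List Int) (text : List Int) : List Int × List Int :=
  let n : Int := (text.length : Int)
  let r := (PySem.List.pyRange 0 n 1).foldl (fpStepA pred) ([], [], false)
  (r.1, if r.2.2 then r.2.1 ++ [n] else r.2.1)

-- ===== PORT B =====
def find_opinion_alt (pred : List Int) (text : List Int) : List Int × List Int :=
  let n : Int := (text.length : Int)
  let opinion_start := (PySem.List.pyRange 0 n 1).filter
    (fun i => PySem.List.pyGetD pred i 0 == 1)
  let opinion_end := opinion_start.map (fun s =>
    match (PySem.List.pyRange (s + 1) n 1).find?
        (fun j => !(PySem.List.pyGetD pred j 0 == 2 || PySem.List.pyGetD pred j 0 == 4)) with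
    | some j => j
    | none => n)
  (opinion_start, opinion_end)

-- ===== PRECONDITION & SPEC =====
-- A raises IndexError (pred[idx]) when pred is shorter than text; exactly those inputs are excluded.
def Pre_find_opinion (pred : List Int) (text : List Int) : Prop := text.length ≤ pred.length
instance (pred : List Int) (text : List Int) : Decidable (Pre_find_opinion pred text) := by
  unfold Pre_find_opinion; infer_instance
def pvWitness_find_opinion : List Int × List Int := ([1, 2, 0], [5, 5, 5])

def Spec_find_opinion (pred : List Int) (text : List Int) (out : List Int × List Int) : Prop := out = find_opinion_alt pred text
instance (pred : List Int) (text : List Int) (out : List Int × List Int) : Decidable (Spec_find_opinion pred text out) := by unfold Spec_find_opinion; infer_instance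

-- ===== CLAIM (what is proved, stated in full; the proofs are below) =====
def Claim_equal_find_opinion : Prop := ∀ (pred : List Int) (text : List Int), Dom_find_opinion pred text → Pre_find_opinion pred text → Spec_find_opinion pred text (find_opinion pred text)

-- ===== LEMMAS AND PROOFS =====

-- starts remaining from index j
def fpS (pred : List Int) (n j : Int) : List Int :=
  (PySem.List.pyRange j n 1).filter (fun i => PySem.List.pyGetD pred i 0 == 1)

-- first index ≥ j whose prediction is neither 2 nor 4, else n (B's closing scan)
def fpC (pred : List Int) (n j : Int) : Int :=
  match (PySem.List.pyRange j n 1).find?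
      (fun j => !(PySem.List.pyGetD pred j 0 == 2 || PySem.List.pyGetD pred j 0 == 4)) with
  | some k => k
  | none => n

lemma fp_loop (pred : List Int) (n : Int) :
    ∀ (m : Nat) (j : Int), j + m = n → ∀ (os oe : List Int) (flag : Bool),
    (let r := (PySem.List.pyRange j n 1).foldl (fpStepA pred) (os, oe, flag)
     ((r.1, if r.2.2 then r.2.1 ++ [n] else r.2.1) : List Int × List Int)) =
    (os ++ fpS pred n j,
     oe ++ ((if flag then [fpC pred n j] else [])
        ++ (fpS pred n j).map (fun s => fpC pred n (s + 1)))) := by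
  intro m
  induction m with
  | zero =>
    intro j hj os oe flag
    have h : j = n := by omega
    subst h
    cases flag <;>
      simp [fpS, fpC, PySem.List.pyRange_one_eq_nil (le_refl j)]
  | succ m ih =>
    intro j hj os oe flag
    have hlt : j < n := by omega
    have hcons := PySem.List.pyRange_one_cons (a := j) (b := n) hlt
    have hS : fpS pred n j =
        (if PySem.List.pyGetD pred j 0 == 1 then [j] else []) ++ fpS pred n (j + 1) := by
      simp only [fpS, hcons, List.filter_cons]
      split <;> simp
    have hC :
        fpC pred n j =
        (if !(PySem.List.pyGetD pred j 0 == 2 || PySem.List.pyGetD pred j 0 == 4) then j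
         else fpC pred n (j + 1)) := by
      unfold fpC
      rw [hcons]
      by_cases hq : (!(PySem.List.pyGetD pred j 0 == 2 || PySem.List.pyGetD pred j 0 == 4)) = true
      · have hq2 : ((!(PySem.List.pyGetD pred j 0 == 2)) && (!(PySem.List.pyGetD pred j 0 == 4))) = true := by
          simpa [Bool.not_or] using hq
        simp [hq2, hq]
      · have hq2 : ((!(PySem.List.pyGetD pred j 0 == 2)) && (!(PySem.List.pyGetD pred j 0 == 4))) = false := by
          simpa [Bool.not_or] using hq
        simp [hq2, hq]
    have ih' := ih (j + 1) (by omega)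
    rw [hcons]
    simp only [List.foldl_cons]
    by_cases h4 : PySem.List.pyGetD pred j 0 = 4
    · -- continue
      have hstep : fpStepA pred (os, oe, flag) j = (os, oe, flag) := by simp [fpStepA, h4]
      rw [hstep, ih' os oe flag, hS, hC]
      simp [h4]
    · by_cases h1 : PySem.List.pyGetD pred j 0 = 1
      · -- start (and close previous if open)
        have hstep : fpStepA pred (os, oe, flag) j =
            (os ++ [j], (if flag then oe ++ [j] else oe), true) := by
          simp [fpStepA, h1]
        rw [hstep, ih' (os ++ [j]) (if flag then oe ++ [j] else oe) true, hS, hC]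
        simp [h1]
        cases flag <;> simp
      · have e4 : (PySem.List.pyGetD pred j 0 == 4) = false := by simp [h4]
        have e1 : (PySem.List.pyGetD pred j 0 == 1) = false := by simp [h1]
        by_cases h2 : PySem.List.pyGetD pred j 0 = 2
        · -- inside-span marker: state unchanged
          have hstep : fpStepA pred (os, oe, flag) j = (os, oe, flag) := by
            simp [fpStepA, h2]
          rw [hstep, ih' os oe flag, hS, hC]
          simp [h2]
        · have e2 : (PySem.List.pyGetD pred j 0 == 2) = false := by simp [h2]
          cases flag with
          | false =>
            have hstep : fpStepA pred (os, oe, false) j = (os, oe, false) := by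
              simp [fpStepA, e4, e1]
            rw [hstep, ih' os oe false, hS]
            simp [e1]
          | true =>
            -- close the open span at j
            have hstep : fpStepA pred (os, oe, true) j = (os, oe ++ [j], false) := by
              simp [fpStepA, e4, e1, e2]
            rw [hstep, ih' os (oe ++ [j]) false, hS, hC]
            simp [e1, e2, h4]

-- ===== VERDICT (by name: the statement is the Claim_ definition above) =====
theorem find_opinion_spec : Claim_equal_find_opinion := by
  unfold Claim_equal_find_opinion
  intro pred text _ _
  unfold Spec_find_opinion find_opinion find_opinion_alt
  have h := fp_loop pred (text.length : Int) text.length 0 (by omega) [] [] false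
  simp only at h
  rw [h]
  simp [fpS, fpC]
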